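-- pv_equiv track=rewrite | github.com/arjun-mann/CodePath_LC | session3.py | can_make_balanced
-- ===== SOURCE A (Python) =====
-- from collections import defaultdict
--
-- def can_make_balanced(code):
--     freqmap = defaultdict(int)
--     low = float('inf')
--     if not code:
--         return False
--     for ch in code:
--         freqmap[ch] += 1
--         low = min(low, freqmap[ch])
--
--     sumvals = 0
--     for val in freqmap.values():
--         sumvals += val
--         sumvals -= low
--     return sumvals == 1
-- ===== SOURCE B (Python) =====
-- def can_make_balanced(code):
--     if not code:
--         return False
--     return len(code) - len(set(code)) == 1
-- ===== Notes on version B (the rewrite author's own statement) =====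
-- stated objective: simpler
-- what changed: Replaced the frequency dictionary with running-min tracking and the summation loop by the closed form len(code) - len(set(code)) == 1 (the running min is always 1 on non-empty input), with an explicit empty-input guard.
import Mathlib
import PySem

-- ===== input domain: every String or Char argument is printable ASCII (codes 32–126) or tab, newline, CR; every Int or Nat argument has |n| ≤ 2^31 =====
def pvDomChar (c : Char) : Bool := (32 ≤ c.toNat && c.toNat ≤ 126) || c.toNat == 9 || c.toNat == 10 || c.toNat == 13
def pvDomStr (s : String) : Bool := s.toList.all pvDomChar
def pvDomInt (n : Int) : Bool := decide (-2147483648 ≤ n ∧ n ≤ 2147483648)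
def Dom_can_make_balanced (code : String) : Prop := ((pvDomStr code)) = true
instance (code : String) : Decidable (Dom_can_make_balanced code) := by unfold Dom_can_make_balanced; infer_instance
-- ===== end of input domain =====

-- B replaces A's frequency dictionary, running-min tracking and summation loop by the
-- closed form len(code) - len(set(code)) == 1 (simpler; same empty-input guard).

-- ===== PORT A =====
-- one loop iteration: freqmap[ch] += 1; low = min(low, freqmap[ch])  (low = none models float('inf'))
def pvStepA (st : PySem.Dict Char Int × Option Int) (ch : Char) : PySem.Dict Char Int × Option Int :=
  let d := st.1.modify ch 0 (· + 1)
  (d, some (match st.2 with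
            | none => d.getD ch 0                -- min(inf, x) = x
            | some l => min l (d.getD ch 0)))

def can_make_balanced (code : String) : Bool :=
  if code.toList = [] then false
  else
    let st := code.toList.foldl pvStepA (PySem.Dict.empty, none)
    -- here code ≠ [], so st.2 is always some; .getD 0 only discharges the Option
    let low : Int := st.2.getD 0
    let sumvals := st.1.values.foldl (fun s v => s + v - low) 0
    decide (sumvals = 1)

-- ===== PORT B =====
def can_make_balanced_alt (code : String) : Bool :=
  if code.toList = [] then false
  else decide ((code.toList.length : Int) - ((PySem.Set.ofList code.toList).length : Int) = 1)

-- ===== PRECONDITION & SPEC =====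
def Spec_can_make_balanced (code : String) (out : Bool) : Prop := out = can_make_balanced_alt code
instance (code : String) (out : Bool) : Decidable (Spec_can_make_balanced code out) := by unfold Spec_can_make_balanced; infer_instance

-- ===== CLAIM (what is proved, stated in full; the proofs are below) =====
def Claim_equal_can_make_balanced : Prop := ∀ (code : String), Dom_can_make_balanced code → Spec_can_make_balanced code (can_make_balanced code)

-- ===== LEMMAS AND PROOFS =====

-- once low = 1 and all counts are ≥ 0, folding keeps low = 1 and the dict is the plain counter fold
theorem pv_fold_inv (l : List Char) : ∀ (d : PySem.Dict Char Int), (∀ c, 0 ≤ d.getD c 0) →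
    l.foldl pvStepA (d, some 1) = (l.foldl (fun d x => d.modify x 0 (· + 1)) d, some 1) := by
  induction l with
  | nil => intro d _; rfl
  | cons x t ih =>
    intro d hd
    have hx : (d.modify x 0 (· + 1)).getD x 0 = d.getD x 0 + 1 :=
      PySem.Dict.getD_modify_self d x 0 (· + 1)
    have hstep : pvStepA (d, some 1) x = (d.modify x 0 (· + 1), some 1) := by
      simp only [pvStepA, hx]
      have : min (1 : Int) (d.getD x 0 + 1) = 1 := min_eq_left (by have := hd x; omega)
      simp [this]
    have hnew : ∀ c, 0 ≤ (d.modify x 0 (· + 1)).getD c 0 := by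
      intro c
      by_cases hc : c = x
      · subst hc; rw [hx]; have := hd c; omega
      · rw [PySem.Dict.getD_modify_of_ne d 0 (· + 1) hc]; exact hd c
    simp only [List.foldl_cons, hstep]
    exact ih _ hnew

-- the whole first loop of A: dict = Counter(code), low = 1, for non-empty code
theorem pv_fold_eq (c : Char) (t : List Char) :
    (c :: t).foldl pvStepA (PySem.Dict.empty, none) = (PySem.Dict.counter (c :: t), some 1) := by
  have h0 : (PySem.Dict.empty : PySem.Dict Char Int).getD c 0 = 0 := rfl
  have hx : ((PySem.Dict.empty : PySem.Dict Char Int).modify c 0 (· + 1)).getD c 0 = 1 := by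
    rw [PySem.Dict.getD_modify_self, h0]; ring
  have hstep : pvStepA (PySem.Dict.empty, none) c
      = ((PySem.Dict.empty : PySem.Dict Char Int).modify c 0 (· + 1), some 1) := by
    simp [pvStepA, hx]
  have hnn : ∀ c', 0 ≤ ((PySem.Dict.empty : PySem.Dict Char Int).modify c 0 (· + 1)).getD c' 0 := by
    intro c'
    by_cases hc : c' = c
    · subst hc; rw [hx]; omega
    · rw [PySem.Dict.getD_modify_of_ne _ 0 (· + 1) hc]; exact le_refl 0
  rw [List.foldl_cons, hstep, pv_fold_inv t _ hnn, PySem.Dict.counter_eq_foldl, List.foldl_cons]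

-- A's second loop in closed form
theorem pv_sum_loop (vs : List Int) : ∀ (s0 : Int),
    vs.foldl (fun s v => s + v - 1) s0 = s0 + vs.sum - vs.length := by
  induction vs with
  | nil => intro s0; simp
  | cons v t ih => intro s0; simp only [List.foldl_cons, ih, List.sum_cons, List.length_cons]; push_cast; ring

-- Σ_{k ∈ set(l)} count(k, l) = len(l)
theorem pv_sum_counts (l : List Char) :
    ((PySem.Set.ofList l).map (fun k => (l.count k : Int))).sum = (l.length : Int) := by
  have hnd : (PySem.Set.ofList l).Nodup := PySem.Set.nodup_ofList l
  have hts : (PySem.Set.ofList l).toFinset = l.toFinset := by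
    ext x; simp [PySem.Set.mem_ofList]
  have h1 : ((PySem.Set.ofList l).map (fun k => l.count k)).sum = l.length := by
    rw [← List.sum_toFinset _ hnd, hts, List.sum_toFinset_count_eq_length]
  calc ((PySem.Set.ofList l).map (fun k => (l.count k : Int))).sum
      = (((PySem.Set.ofList l).map (fun k => l.count k)).sum : Int) := by
        rw [Nat.cast_list_sum, List.map_map]; rfl
    _ = (l.length : Int) := by rw [h1]

-- ===== VERDICT (by name: the statement is the Claim_ definition above) =====
theorem can_make_balanced_spec : Claim_equal_can_make_balanced := by
  intro code _
  unfold Spec_can_make_balanced can_make_balanced can_make_balanced_alt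
  cases hl : code.toList with
  | nil => simp
  | cons c t =>
    rw [if_neg (List.cons_ne_nil c t)]
    rw [pv_fold_eq c t]
    have hvals : (PySem.Dict.counter (c :: t)).values
        = (PySem.Set.ofList (c :: t)).map (fun k => ((c :: t).count k : Int)) := by
      simp only [PySem.Dict.values, PySem.Dict.items_counter, List.map_map]
      rfl
    simp only [Option.getD_some, hvals, pv_sum_loop, List.length_map, pv_sum_counts]
    rw [zero_add, if_neg (List.cons_ne_nil c t)]
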